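-- pv_equiv track=rewrite | github.com/pmareke/aoc | src/day_fourteen.py | _build_quadrants
-- ===== SOURCE A (Python) =====
-- from collections import defaultdict
--
-- def _build_quadrants(
--     wide: int, tall: int, points: dict[tuple, int]
-- ) -> defaultdict:
--     middle_x = wide // 2
--     middle_y = tall // 2
--     quadrants = defaultdict(list)
--     for point, times in points.items():
--         x, y = point
--         if x < middle_x and y < middle_y:
--             quadrants["UL"].append((point, times))
--             continue
--         if x > middle_x and y < middle_y:
--             quadrants["UR"].append((point, times))
--             continue
--         if x < middle_x and y > middle_y:
--             quadrants["DL"].append((point, times))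
--             continue
--         else:
--             quadrants["DR"].append((point, times))
--     return quadrants
-- ===== SOURCE B (Python) =====
-- from collections import defaultdict
--
-- def _build_quadrants(
--     wide: int, tall: int, points: dict[tuple, int]
-- ) -> defaultdict:
--     middle_x = wide // 2
--     middle_y = tall // 2
--
--     def label(x, y):
--         if y < middle_y:
--             if x < middle_x:
--                 return "UL"
--             if x > middle_x:
--                 return "UR"
--             return "DR"
--         if y > middle_y and x < middle_x:
--             return "DL"
--         return "DR"
--
--     items = list(points.items())
--     labels = [label(x, y) for (x, y), _ in items]
--     quadrants = defaultdict(list)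
--     for lab in dict.fromkeys(labels):  # distinct labels, first-occurrence order
--         quadrants[lab] = [pair for pair, l in zip(items, labels) if l == lab]
--     return quadrants
-- ===== Notes on version B (the rewrite author's own statement) =====
-- stated objective: alternative
-- what changed: Replaces the single-pass if/continue chain appending into a defaultdict with a staged group-by: one pass computes a label per point, dict.fromkeys dedupes labels in first-occurrence order, and each distinct label gets its own filter pass over the zipped (point, label) list.
import Mathlib
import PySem

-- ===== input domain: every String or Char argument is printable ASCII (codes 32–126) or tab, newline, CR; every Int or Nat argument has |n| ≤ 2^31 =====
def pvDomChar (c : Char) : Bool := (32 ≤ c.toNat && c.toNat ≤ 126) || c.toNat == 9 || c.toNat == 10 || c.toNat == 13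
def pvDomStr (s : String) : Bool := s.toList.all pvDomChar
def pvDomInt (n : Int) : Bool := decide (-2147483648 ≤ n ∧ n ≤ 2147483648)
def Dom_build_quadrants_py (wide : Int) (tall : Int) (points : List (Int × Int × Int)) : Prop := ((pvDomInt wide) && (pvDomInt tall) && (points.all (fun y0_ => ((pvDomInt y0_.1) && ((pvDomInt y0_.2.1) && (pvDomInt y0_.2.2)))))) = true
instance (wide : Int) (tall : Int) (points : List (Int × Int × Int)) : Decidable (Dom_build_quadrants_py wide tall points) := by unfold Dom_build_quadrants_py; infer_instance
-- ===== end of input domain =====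

-- B is a staged group-by (classify all points, dedupe labels, one filter pass per
-- distinct label) instead of A's single pass appending each point into a defaultdict.

-- ===== PORT A =====
-- one loop-body step of A: the if/continue chain appending into the defaultdict
def pvAStep (mx my : Int) (d : PySem.Dict String (List ((Int × Int) × Int)))
    (p : Int × Int × Int) : PySem.Dict String (List ((Int × Int) × Int)) :=
  let x := p.1
  let y := p.2.1
  let times := p.2.2
  if x < mx ∧ y < my then d.modify "UL" [] (· ++ [((x, y), times)])
  else if x > mx ∧ y < my then d.modify "UR" [] (· ++ [((x, y), times)])
  else if x < mx ∧ y > my then d.modify "DL" [] (· ++ [((x, y), times)])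
  else d.modify "DR" [] (· ++ [((x, y), times)])

def build_quadrants_py (wide : Int) (tall : Int) (points : List (Int × Int × Int)) : List (String × List ((Int × Int) × Int)) :=
  let middle_x := PySem.Int.floordiv wide 2
  let middle_y := PySem.Int.floordiv tall 2
  (points.foldl (pvAStep middle_x middle_y) PySem.Dict.empty).items

-- ===== PORT B =====
-- B's nested helper `label(x, y)`: branches on y first
def pvLabel (mx my x y : Int) : String :=
  if y < my then
    if x < mx then "UL"
    else if x > mx then "UR"
    else "DR"
  else if y > my ∧ x < mx then "DL"
  else "DR"

def build_quadrants_py_alt (wide : Int) (tall : Int) (points : List (Int × Int × Int)) : List (String × List ((Int × Int) × Int)) :=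
  let middle_x := PySem.Int.floordiv wide 2
  let middle_y := PySem.Int.floordiv tall 2
  let items : List ((Int × Int) × Int) := points.map (fun p => ((p.1, p.2.1), p.2.2))
  let labels := items.map (fun q => pvLabel middle_x middle_y q.1.1 q.1.2)
  -- dict.fromkeys = first-occurrence dedup = PySem.List.dedup
  (PySem.List.dedup labels).map (fun lab =>
    (lab, ((items.zip labels).filter (fun q => q.2 == lab)).map (·.1)))

-- ===== PRECONDITION & SPEC =====
def Spec_build_quadrants_py (wide : Int) (tall : Int) (points : List (Int × Int × Int)) (out : List (String × List ((Int × Int) × Int))) : Prop := out = build_quadrants_py_alt wide tall points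
instance (wide : Int) (tall : Int) (points : List (Int × Int × Int)) (out : List (String × List ((Int × Int) × Int))) : Decidable (Spec_build_quadrants_py wide tall points out) := by unfold Spec_build_quadrants_py; infer_instance

-- ===== CLAIM (what is proved, stated in full; the proofs are below) =====
def Claim_equal_build_quadrants_py : Prop := ∀ (wide : Int) (tall : Int) (points : List (Int × Int × Int)), Dom_build_quadrants_py wide tall points → Spec_build_quadrants_py wide tall points (build_quadrants_py wide tall points)

-- ===== LEMMAS AND PROOFS =====

-- A's if/continue chain is a single modify at B's label
theorem pvAStep_eq_modify (mx my : Int) (d : PySem.Dict String (List ((Int × Int) × Int)))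
    (p : Int × Int × Int) :
    pvAStep mx my d p
      = d.modify (pvLabel mx my p.1 p.2.1) [] (· ++ [((p.1, p.2.1), p.2.2)]) := by
  obtain ⟨x, y, t⟩ := p
  simp only [pvAStep, pvLabel]
  split_ifs with h1 h2 h3 <;> first | rfl | omega

theorem build_quadrants_py_spec_aux (mx my : Int) (points : List (Int × Int × Int)) :
    (points.foldl (pvAStep mx my) PySem.Dict.empty).items
      = (PySem.List.dedup ((points.map (fun p => ((p.1, p.2.1), p.2.2))).map
            (fun q => pvLabel mx my q.1.1 q.1.2))).map (fun lab =>
          (lab, (((points.map (fun p => ((p.1, p.2.1), p.2.2))).zip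
              ((points.map (fun p => ((p.1, p.2.1), p.2.2))).map
                (fun q => pvLabel mx my q.1.1 q.1.2))).filter
              (fun q => q.2 == lab)).map (·.1))) := by
  -- rewrite A's fold as a keyed modify-fold over the labeled list L
  have hstep : points.foldl (pvAStep mx my) PySem.Dict.empty
      = (points.map (fun p => (pvLabel mx my p.1 p.2.1, ((p.1, p.2.1), p.2.2)))).foldl
          (fun d q => d.modify q.1 [] (· ++ [q.2])) PySem.Dict.empty := by
    rw [List.foldl_map]
    exact List.foldl_ext _ _ _ (fun d p _ => pvAStep_eq_modify mx my d p)
  set L := points.map (fun p => (pvLabel mx my p.1 p.2.1, ((p.1, p.2.1), p.2.2))) with hL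
  set D := L.foldl (fun d q => d.modify q.1 [] (· ++ [q.2])) PySem.Dict.empty with hD
  have hnd : D.keys.Nodup := by
    rw [hD]
    exact PySem.Dict.nodup_keys_foldl_modify_key L Prod.fst [] (fun _ q => (· ++ [q.2])) _
      PySem.Dict.nodup_keys_empty
  have hkeys : D.keys = PySem.List.dedup (L.map Prod.fst) := by
    rw [hD, PySem.Dict.keys_foldl_modify_key]
    simp [PySem.Dict.keys_empty, PySem.List.dedup_eq_ofList, PySem.Set.update_nil_left]
  have hget : ∀ k, D.getD k [] = (L.filter (fun q => q.1 == k)).map (·.2) := by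
    intro k
    rw [hD, PySem.Dict.getD_foldl_modify_append]
    simp [PySem.Dict.getD_empty]
  have hlabels : (points.map (fun p => ((p.1, p.2.1), p.2.2))).map
        (fun q => pvLabel mx my q.1.1 q.1.2) = L.map Prod.fst := by
    simp [hL, List.map_map, Function.comp]
  have hzip : (points.map (fun p => ((p.1, p.2.1), p.2.2))).zip (L.map Prod.fst)
      = points.map (fun p => (((p.1, p.2.1), p.2.2), pvLabel mx my p.1 p.2.1)) := by
    have := List.zip_map' (f := fun p : Int × Int × Int => ((p.1, p.2.1), p.2.2))
      (g := fun p : Int × Int × Int => pvLabel mx my p.1 p.2.1) (l := points)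
    simpa [hL, List.map_map, Function.comp] using this
  rw [hstep, PySem.Dict.items_eq_map_keys D hnd [], hkeys, hlabels, hzip]
  apply List.map_congr_left
  intro lab _
  rw [hget lab]
  simp [hL, List.filter_map, List.map_map, Function.comp_def]

-- ===== VERDICT (by name: the statement is the Claim_ definition above) =====
theorem build_quadrants_py_spec : Claim_equal_build_quadrants_py := by
  intro wide tall points _
  unfold Spec_build_quadrants_py build_quadrants_py build_quadrants_py_alt
  exact build_quadrants_py_spec_aux _ _ points
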